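-- pv_equiv track=rewrite | github.com/groupthinking/vision | self-correcting-executor-PRODUCTION/agents/specialized/code_analysis_subagents.py | _generate_naming_recommendations
-- ===== SOURCE A (Python) =====
-- from typing import Dict, List, Any, Optional
--
-- def _generate_naming_recommendations(naming_violations: List) -> List[str]:
--     """Generate actionable naming recommendations"""
--     recommendations = []
--
--     if any(violation.get("type") == "snake_case" for violation in naming_violations):
--         recommendations.append("Use snake_case for variable and function names in Python")
--
--     if any(violation.get("type") == "pascal_case" for violation in naming_violations):
--         recommendations.append("Use PascalCase for class names")
--
--     if any(violation.get("type") == "constant_case" for violation in naming_violations):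
--         recommendations.append("Use UPPER_SNAKE_CASE for constants")
--
--     if any(violation.get("type") == "descriptive" for violation in naming_violations):
--         recommendations.append("Use more descriptive names instead of single letters or abbreviations")
--
--     if not recommendations:
--         recommendations.append("Naming conventions are well followed")
--
--     return recommendations
-- ===== SOURCE B (Python) =====
-- _NAMING_RULES = [
--     ("snake_case", "Use snake_case for variable and function names in Python"),
--     ("pascal_case", "Use PascalCase for class names"),
--     ("constant_case", "Use UPPER_SNAKE_CASE for constants"),
--     ("descriptive", "Use more descriptive names instead of single letters or abbreviations"),
-- ]
--
-- def _generate_naming_recommendations(naming_violations):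
--     """Generate actionable naming recommendations"""
--     types_seen = {v.get("type") for v in naming_violations}
--     recommendations = [msg for typ, msg in _NAMING_RULES if typ in types_seen]
--     return recommendations or ["Naming conventions are well followed"]
-- ===== Notes on version B (the rewrite author's own statement) =====
-- stated objective: simpler
-- what changed: One pass builds a set of violation types, then a rule table drives a single comprehension, replacing four separate whole-list any() scans and repeated literal branches.
import Mathlib
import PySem

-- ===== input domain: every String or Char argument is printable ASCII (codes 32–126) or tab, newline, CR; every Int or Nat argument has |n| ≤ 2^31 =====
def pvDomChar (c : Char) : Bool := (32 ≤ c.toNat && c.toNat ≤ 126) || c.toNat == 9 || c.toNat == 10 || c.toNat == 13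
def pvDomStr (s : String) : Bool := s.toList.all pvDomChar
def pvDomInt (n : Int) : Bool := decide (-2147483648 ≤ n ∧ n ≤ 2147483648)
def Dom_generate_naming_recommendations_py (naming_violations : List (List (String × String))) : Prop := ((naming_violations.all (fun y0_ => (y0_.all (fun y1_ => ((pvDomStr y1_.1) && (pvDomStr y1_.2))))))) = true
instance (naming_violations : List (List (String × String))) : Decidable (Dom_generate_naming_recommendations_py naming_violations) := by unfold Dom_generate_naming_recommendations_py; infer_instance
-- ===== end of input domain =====

-- ===== PORT A =====
-- B performs the same task with a different structure (type set + rule table); A's side effects: none.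
-- v.get("type"): first-match lookup in the association list
def pvGetType (v : List (String × String)) : Option String := (PySem.Dict.mk v).get? "type"

-- literal transliteration of A: four sequential any-scans, each appending its string
def generate_naming_recommendations_py (naming_violations : List (List (String × String))) : List String :=
  let recommendations : List String := []
  let recommendations := if naming_violations.any (fun violation => pvGetType violation == some "snake_case")
    then recommendations ++ ["Use snake_case for variable and function names in Python"] else recommendations
  let recommendations := if naming_violations.any (fun violation => pvGetType violation == some "pascal_case")
    then recommendations ++ ["Use PascalCase for class names"] else recommendations
  let recommendations := if naming_violations.any (fun violation => pvGetType violation == some "constant_case")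
    then recommendations ++ ["Use UPPER_SNAKE_CASE for constants"] else recommendations
  let recommendations := if naming_violations.any (fun violation => pvGetType violation == some "descriptive")
    then recommendations ++ ["Use more descriptive names instead of single letters or abbreviations"] else recommendations
  if recommendations = [] then recommendations ++ ["Naming conventions are well followed"] else recommendations

-- ===== PORT B =====
def pvNamingRules : List (String × String) :=
  [("snake_case", "Use snake_case for variable and function names in Python"),
   ("pascal_case", "Use PascalCase for class names"),
   ("constant_case", "Use UPPER_SNAKE_CASE for constants"),
   ("descriptive", "Use more descriptive names instead of single letters or abbreviations")]

-- transliteration of B: one pass builds the set of seen types, a comprehension over the rule table emits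
def generate_naming_recommendations_py_alt (naming_violations : List (List (String × String))) : List String :=
  let types_seen : PySem.Set (Option String) :=
    PySem.Set.ofList (naming_violations.map (fun v => pvGetType v))
  let recommendations :=
    (pvNamingRules.filter (fun r => PySem.Set.contains types_seen (some r.1))).map (fun r => r.2)
  if recommendations = [] then ["Naming conventions are well followed"] else recommendations

-- ===== PRECONDITION & SPEC =====
def Spec_generate_naming_recommendations_py (naming_violations : List (List (String × String))) (out : List String) : Prop := out = generate_naming_recommendations_py_alt naming_violations
instance (naming_violations : List (List (String × String))) (out : List String) : Decidable (Spec_generate_naming_recommendations_py naming_violations out) := by unfold Spec_generate_naming_recommendations_py; infer_instance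

-- ===== CLAIM (what is proved, stated in full; the proofs are below) =====
def Claim_equal_generate_naming_recommendations_py : Prop := ∀ (naming_violations : List (List (String × String))), Dom_generate_naming_recommendations_py naming_violations → Spec_generate_naming_recommendations_py naming_violations (generate_naming_recommendations_py naming_violations)

-- ===== LEMMAS AND PROOFS =====
-- membership of a type in B's set coincides with A's any-scan for that type
theorem pv_contains_eq_any (nv : List (List (String × String))) (t : String) :
    PySem.Set.contains (PySem.Set.ofList (nv.map (fun v => pvGetType v))) (some t)
      = nv.any (fun violation => pvGetType violation == some t) := by
  apply Bool.eq_iff_iff.mpr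
  simp only [PySem.Set.contains_iff, PySem.Set.mem_ofList, List.mem_map, List.any_eq_true,
    beq_iff_eq]

-- ===== VERDICT (by name: the statement is the Claim_ definition above) =====
theorem generate_naming_recommendations_py_spec : Claim_equal_generate_naming_recommendations_py := by
  intro nv _
  unfold Spec_generate_naming_recommendations_py generate_naming_recommendations_py
    generate_naming_recommendations_py_alt
  simp only [pv_contains_eq_any, pvNamingRules, List.filter]
  cases nv.any (fun violation => pvGetType violation == some "snake_case") <;>
  cases nv.any (fun violation => pvGetType violation == some "pascal_case") <;>
  cases nv.any (fun violation => pvGetType violation == some "constant_case") <;>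
  cases nv.any (fun violation => pvGetType violation == some "descriptive") <;>
  simp
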